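-- pv_equiv track=rewrite | github.com/kmgyu/baekJoonPractice | 18436.py | query
-- ===== SOURCE A (Python) =====
-- def query(tree, node, start, end, left, right):
--     if left > end or right < start:
--         return (0, 0)
--     if left <= start and end <= right:
--         return tree[node]
--     lsum = query(tree, node*2, start, (start+end)//2, left, right)
--     rsum = query(tree, node*2+1, (start+end)//2+1, end, left, right)
--     return lsum[0] + rsum[0], lsum[1] + rsum[1]
-- ===== SOURCE B (Python) =====
-- def query(tree, node, start, end, left, right):
--     even = 0
--     odd = 0
--     stack = [(node, start, end)]
--     while stack:
--         nd, s, e = stack.pop()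
--         if left > e or right < s:
--             continue
--         if left <= s and e <= right:
--             ev, od = tree[nd]
--             even += ev
--             odd += od
--             continue
--         mid = (s + e) // 2
--         stack.append((nd * 2, s, mid))
--         stack.append((nd * 2 + 1, mid + 1, e))
--     return (even, odd)
-- ===== Notes on version B (the rewrite author's own statement) =====
-- stated objective: alternative
-- what changed: Replaces A's recursion with an iterative DFS over an explicit stack of (node,start,end) frames and two running even/odd accumulators.
import Mathlib
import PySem

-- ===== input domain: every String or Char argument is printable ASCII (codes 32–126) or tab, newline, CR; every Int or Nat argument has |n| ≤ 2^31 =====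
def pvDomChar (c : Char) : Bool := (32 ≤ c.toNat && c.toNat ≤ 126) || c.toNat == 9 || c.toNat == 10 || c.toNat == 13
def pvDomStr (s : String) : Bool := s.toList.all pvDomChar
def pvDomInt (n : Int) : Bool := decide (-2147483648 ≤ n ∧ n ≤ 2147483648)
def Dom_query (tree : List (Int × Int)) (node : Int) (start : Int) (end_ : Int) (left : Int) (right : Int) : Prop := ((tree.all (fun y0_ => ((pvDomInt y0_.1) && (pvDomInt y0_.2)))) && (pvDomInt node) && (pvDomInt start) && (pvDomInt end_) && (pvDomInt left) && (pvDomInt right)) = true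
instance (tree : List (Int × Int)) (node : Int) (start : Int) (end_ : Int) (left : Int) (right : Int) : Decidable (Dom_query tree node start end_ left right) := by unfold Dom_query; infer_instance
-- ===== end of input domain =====

-- B replaces A's recursion by an iterative DFS over an explicit stack with two running
-- accumulators (objective: alternative decomposition, same asymptotic cost).

-- ===== PORT A =====
-- A's recursion, made structural on a fuel that is provably sufficient (the interval
-- strictly shrinks at every recursive call); 'tree[node]' is totalised with pyGetD,
-- whose default branch is unreachable under Pre_query.
def queryFuel (tree : List (Int × Int)) : Nat → Int → Int → Int → Int → Int → Int × Int
  | 0, _, _, _, _, _ => (0, 0)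
  | f + 1, node, start, end_, left, right =>
    if left > end_ ∨ right < start then (0, 0)
    else if left ≤ start ∧ end_ ≤ right then PySem.List.pyGetD tree node (0, 0)
    else
      let lsum := queryFuel tree f (node * 2) start (PySem.Int.floordiv (start + end_) 2) left right
      let rsum := queryFuel tree f (node * 2 + 1) (PySem.Int.floordiv (start + end_) 2 + 1) end_ left right
      (lsum.1 + rsum.1, lsum.2 + rsum.2)

def query (tree : List (Int × Int)) (node : Int) (start : Int) (end_ : Int) (left : Int) (right : Int) : Int × Int :=
  queryFuel tree ((end_ - start).toNat + 1) node start end_ left right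

-- ===== PORT B =====
-- the while-loop over the explicit stack of (node, start, end) frames (head = top of
-- stack), also on a provably sufficient fuel (each iteration pops one frame and pushes
-- at most two strictly smaller ones)
def queryAltLoop (tree : List (Int × Int)) (left right : Int) : Nat → List (Int × Int × Int) → Int → Int → Int × Int
  | 0, _, even, odd => (even, odd)
  | _ + 1, [], even, odd => (even, odd)
  | f + 1, (nd, s, e) :: rest, even, odd =>
    if left > e ∨ right < s then
      queryAltLoop tree left right f rest even odd
    else if left ≤ s ∧ e ≤ right then
      let p := PySem.List.pyGetD tree nd (0, 0)
      queryAltLoop tree left right f rest (even + p.1) (odd + p.2)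
    else
      let mid := PySem.Int.floordiv (s + e) 2
      queryAltLoop tree left right f ((nd * 2 + 1, mid + 1, e) :: (nd * 2, s, mid) :: rest) even odd

def query_alt (tree : List (Int × Int)) (node : Int) (start : Int) (end_ : Int) (left : Int) (right : Int) : Int × Int :=
  queryAltLoop tree left right (3 * (end_ - start).toNat + 2) [(node, start, end_)] 0 0

-- ===== PRECONDITION & SPEC =====
-- querySafeFuel states, over the input's interval structure only (it computes no counts),
-- that every tree index the query dereferences is a valid Python index; it is structural
-- on a fuel that is provably sufficient (the interval strictly shrinks at every split,
-- so the fuel used in Pre_query below is never exhausted).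
def querySafeFuel (len : Nat) : Nat → Int → Int → Int → Int → Int → Bool
  | 0, _, _, _, _, _ => true
  | f + 1, node, start, end_, left, right =>
    if left > end_ ∨ right < start then true
    else if left ≤ start ∧ end_ ≤ right then decide (PySem.Raise.InRange len node)
    else
      querySafeFuel len f (node * 2) start (PySem.Int.floordiv (start + end_) 2) left right &&
      querySafeFuel len f (node * 2 + 1) (PySem.Int.floordiv (start + end_) 2 + 1) end_ left right

-- Pre_query holds exactly when every tree[...] access A performs is in range (Python A
-- raises IndexError otherwise); it excludes no input on which A returns a value.
def Pre_query (tree : List (Int × Int)) (node : Int) (start : Int) (end_ : Int) (left : Int) (right : Int) : Prop :=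
  querySafeFuel tree.length ((end_ - start).toNat + 1) node start end_ left right = true
instance (tree : List (Int × Int)) (node : Int) (start : Int) (end_ : Int) (left : Int) (right : Int) : Decidable (Pre_query tree node start end_ left right) := by unfold Pre_query; infer_instance

def pvWitness_query : (List (Int × Int)) × Int × Int × Int × Int × Int := ([(1, 2), (3, 4)], 1, 0, 0, 0, 0)

def Spec_query (tree : List (Int × Int)) (node : Int) (start : Int) (end_ : Int) (left : Int) (right : Int) (out : Int × Int) : Prop := out = query_alt tree node start end_ left right
instance (tree : List (Int × Int)) (node : Int) (start : Int) (end_ : Int) (left : Int) (right : Int) (out : Int × Int) : Decidable (Spec_query tree node start end_ left right out) := by unfold Spec_query; infer_instance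

-- ===== CLAIM (what is proved, stated in full; the proofs are below) =====
def Claim_equal_query : Prop := ∀ (tree : List (Int × Int)) (node : Int) (start : Int) (end_ : Int) (left : Int) (right : Int), Dom_query tree node start end_ left right → Pre_query tree node start end_ left right → Spec_query tree node start end_ left right (query tree node start end_ left right)

-- ===== LEMMAS AND PROOFS =====

-- midpoint bounds used throughout the proofs
theorem pvMidLo {s e left right : Int} (h1 : ¬(left > e ∨ right < s))
    (h2 : ¬(left ≤ s ∧ e ≤ right)) :
    (PySem.Int.floordiv (s + e) 2 - s).toNat < (e - s).toNat := by
  have hse : s < e := by omega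
  rw [PySem.Int.floordiv_eq_ediv_of_pos (show (0:Int) < 2 by omega)]
  omega

theorem pvMidHi {s e left right : Int} (h1 : ¬(left > e ∨ right < s))
    (h2 : ¬(left ≤ s ∧ e ≤ right)) :
    (e - (PySem.Int.floordiv (s + e) 2 + 1)).toNat < (e - s).toNat := by
  have hse : s < e := by omega
  rw [PySem.Int.floordiv_eq_ediv_of_pos (show (0:Int) < 2 by omega)]
  omega

theorem pvMidSplit {s e left right : Int} (h1 : ¬(left > e ∨ right < s))
    (h2 : ¬(left ≤ s ∧ e ≤ right)) :
    (PySem.Int.floordiv (s + e) 2 - s).toNat +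
      (e - (PySem.Int.floordiv (s + e) 2 + 1)).toNat + 1 = (e - s).toNat := by
  have hse : s < e := by omega
  rw [PySem.Int.floordiv_eq_ediv_of_pos (show (0:Int) < 2 by omega)]
  omega

-- the fuel does not matter as long as it exceeds the interval length
theorem queryFuel_irrel (tree : List (Int × Int)) (left right : Int) :
    ∀ (k f1 f2 : Nat) (node start end_ : Int),
      (end_ - start).toNat ≤ k → (end_ - start).toNat < f1 → (end_ - start).toNat < f2 →
      queryFuel tree f1 node start end_ left right = queryFuel tree f2 node start end_ left right := by
  intro k
  induction k with
  | zero =>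
    intro f1 f2 node start end_ hk h1 h2
    match f1, f2 with
    | a + 1, b + 1 =>
      simp only [queryFuel]
      split_ifs with hd hc
      · rfl
      · rfl
      · exact absurd (pvMidLo hd hc) (by omega)
  | succ k ih =>
    intro f1 f2 node start end_ hk h1 h2
    match f1, f2 with
    | a + 1, b + 1 =>
      simp only [queryFuel]
      split_ifs with hd hc
      · rfl
      · rfl
      · have hlo := pvMidLo hd hc
        have hhi := pvMidHi hd hc
        rw [ih a b _ _ _ (by omega) (by omega) (by omega),
            ih a b _ _ _ (by omega) (by omega) (by omega)]

-- the one-step unfolding of A in terms of query itself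
theorem query_eq (tree : List (Int × Int)) (node start end_ left right : Int) :
    query tree node start end_ left right =
      if left > end_ ∨ right < start then (0, 0)
      else if left ≤ start ∧ end_ ≤ right then PySem.List.pyGetD tree node (0, 0)
      else
        ((query tree (node * 2) start (PySem.Int.floordiv (start + end_) 2) left right).1 +
           (query tree (node * 2 + 1) (PySem.Int.floordiv (start + end_) 2 + 1) end_ left right).1,
         (query tree (node * 2) start (PySem.Int.floordiv (start + end_) 2) left right).2 +
           (query tree (node * 2 + 1) (PySem.Int.floordiv (start + end_) 2 + 1) end_ left right).2) := by
  unfold query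
  conv_lhs => rw [queryFuel]
  split_ifs with hd hc
  · rfl
  · rfl
  · have hlo := pvMidLo hd hc
    have hhi := pvMidHi hd hc
    rw [queryFuel_irrel tree left right ((end_ - start).toNat) ((end_ - start).toNat)
          ((PySem.Int.floordiv (start + end_) 2 - start).toNat + 1) _ _ _ (by omega) (by omega) (by omega),
        queryFuel_irrel tree left right ((end_ - start).toNat) ((end_ - start).toNat)
          ((end_ - (PySem.Int.floordiv (start + end_) 2 + 1)).toNat + 1) _ _ _ (by omega) (by omega) (by omega)]

-- sum of A's answers over a stack of frames (proof-side only)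
def frameSum (tree : List (Int × Int)) (left right : Int) : List (Int × Int × Int) → Int × Int
  | [] => (0, 0)
  | (nd, s, e) :: rest =>
    let q := query tree nd s e left right
    let r := frameSum tree left right rest
    (q.1 + r.1, q.2 + r.2)

-- fuel needed to drain a stack (proof-side only)
def stackFuel : List (Int × Int × Int) → Nat
  | [] => 0
  | (_, s, e) :: rest => 3 * (e - s).toNat + 2 + stackFuel rest

theorem queryAltLoop_eq (tree : List (Int × Int)) (left right : Int) :
    ∀ (f : Nat) (stack : List (Int × Int × Int)) (even odd : Int),
      stackFuel stack ≤ f →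
      queryAltLoop tree left right f stack even odd =
        (even + (frameSum tree left right stack).1, odd + (frameSum tree left right stack).2) := by
  intro f
  induction f with
  | zero =>
    intro stack even odd hf
    match stack with
    | [] => simp [queryAltLoop, frameSum]
    | (nd, s, e) :: rest => exact absurd hf (by simp [stackFuel])
  | succ f ih =>
    intro stack even odd hf
    match stack with
    | [] => simp [queryAltLoop, frameSum]
    | (nd, s, e) :: rest =>
      simp only [queryAltLoop]
      split_ifs with hd hc
      · rw [ih rest even odd (by simp [stackFuel] at hf ⊢; omega)]
        have hq : query tree nd s e left right = (0, 0) := by rw [query_eq]; simp [hd]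
        simp [frameSum, hq]
      · rw [ih rest _ _ (by simp [stackFuel] at hf ⊢; omega)]
        have hq : query tree nd s e left right = PySem.List.pyGetD tree nd (0, 0) := by
          rw [query_eq]; simp [hd, hc]
        simp only [frameSum, hq, Prod.mk.injEq]
        constructor <;> ring
      · have hsplit := pvMidSplit hd hc
        rw [ih _ even odd (by simp only [stackFuel] at hf ⊢; omega)]
        have hq : query tree nd s e left right =
            ((query tree (nd * 2) s (PySem.Int.floordiv (s + e) 2) left right).1 +
               (query tree (nd * 2 + 1) (PySem.Int.floordiv (s + e) 2 + 1) e left right).1,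
             (query tree (nd * 2) s (PySem.Int.floordiv (s + e) 2) left right).2 +
               (query tree (nd * 2 + 1) (PySem.Int.floordiv (s + e) 2 + 1) e left right).2) := by
          rw [query_eq]; simp [hd, hc]
        simp only [frameSum, hq, Prod.mk.injEq]
        constructor <;> ring

-- ===== VERDICT (by name: the statement is the Claim_ definition above) =====
theorem query_spec : Claim_equal_query := by
  intro tree node start end_ left right _ _
  unfold Spec_query query_alt
  rw [queryAltLoop_eq tree left right _ _ _ _ (by simp [stackFuel])]
  simp [frameSum]
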